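-- pv_equiv track=rewrite | github.com/panton8/leetcode-tasks | 2053.py | kthDistinct1
-- ===== SOURCE A (Python) =====
-- from typing import List
--
-- def kthDistinct1(arr: List[str], k: int) -> str:
--     for i in range(len(arr)):
--         is_unique = True
--         for j in range(len(arr)):
--             if i == j:
--                 continue
--             if arr[i] == arr[j]:
--                 is_unique = False
--                 break
--         if is_unique:
--             k -= 1
--             if k == 0:
--                 return arr[i]
--     return ''
-- ===== SOURCE B (Python) =====
-- def kthDistinct1(arr, k):
--     cnt = {}
--     for x in arr:
--         cnt[x] = cnt.get(x, 0) + 1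
--     for x in arr:
--         if cnt[x] == 1:
--             k -= 1
--             if k == 0:
--                 return x
--     return ''
-- ===== Notes on version B (the rewrite author's own statement) =====
-- stated objective: faster
-- what changed: Replaces the quadratic per-element rescan (inner loop over all other indices) with one counting pass building a frequency dict followed by one ordered scan.
import Mathlib
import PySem

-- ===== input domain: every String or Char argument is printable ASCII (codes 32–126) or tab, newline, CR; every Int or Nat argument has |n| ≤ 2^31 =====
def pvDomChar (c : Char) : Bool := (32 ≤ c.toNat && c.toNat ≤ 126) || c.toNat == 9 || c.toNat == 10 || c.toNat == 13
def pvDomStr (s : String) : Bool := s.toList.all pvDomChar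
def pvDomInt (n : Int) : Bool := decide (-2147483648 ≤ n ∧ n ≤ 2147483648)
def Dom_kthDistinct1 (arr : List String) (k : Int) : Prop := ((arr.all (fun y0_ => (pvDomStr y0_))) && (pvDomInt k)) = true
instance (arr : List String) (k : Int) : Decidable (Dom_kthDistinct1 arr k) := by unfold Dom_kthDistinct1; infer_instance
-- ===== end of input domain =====

-- B builds a frequency dict in one pass and then scans once, replacing A's inner rescan loop.

-- ===== PORT A =====
-- inner loop over j (arr[i], arr[j] are in range, so getD is exact for Python's arr[i])
def innerA (arr : List String) (i j : Nat) : Bool :=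
  if j < arr.length then
    if i = j then innerA arr i (j + 1)
    else if arr.getD i "" = arr.getD j "" then false
    else innerA arr i (j + 1)
  else true
termination_by arr.length - j

-- outer loop over i with early return
def loopA (arr : List String) (i : Nat) (k : Int) : String :=
  if i < arr.length then
    if innerA arr i 0 then
      if k - 1 = 0 then arr.getD i ""
      else loopA arr (i + 1) (k - 1)
    else loopA arr (i + 1) k
  else ""
termination_by arr.length - i

def kthDistinct1 (arr : List String) (k : Int) : String := loopA arr 0 k

-- ===== PORT B =====
-- second pass: cnt[x] is always present (x ∈ arr), so getD 0 is exact for cnt[x]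
def loopB (cnt : PySem.Dict String Int) : List String → Int → String
  | [], _ => ""
  | x :: xs, k =>
    if cnt.getD x 0 = 1 then
      if k - 1 = 0 then x else loopB cnt xs (k - 1)
    else loopB cnt xs k

def kthDistinct1_alt (arr : List String) (k : Int) : String :=
  let cnt := arr.foldl (fun d x => d.insert x (d.getD x 0 + 1)) PySem.Dict.empty
  loopB cnt arr k

-- ===== PRECONDITION & SPEC =====
def Spec_kthDistinct1 (arr : List String) (k : Int) (out : String) : Prop := out = kthDistinct1_alt arr k
instance (arr : List String) (k : Int) (out : String) : Decidable (Spec_kthDistinct1 arr k out) := by unfold Spec_kthDistinct1; infer_instance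

-- ===== CLAIM (what is proved, stated in full; the proofs are below) =====
def Claim_equal_kthDistinct1 : Prop := ∀ (arr : List String) (k : Int), Dom_kthDistinct1 arr k → Spec_kthDistinct1 arr k (kthDistinct1 arr k)

-- ===== LEMMAS AND PROOFS =====

-- A's inner loop from j decides: no index j' ≥ j other than i holds the same string as arr[i]
lemma innerA_iff (arr : List String) (i : Nat) : ∀ j,
    innerA arr i j = true ↔
      ∀ j' (h : j' < arr.length), j ≤ j' → j' ≠ i → arr[j'] ≠ arr.getD i "" := by
  intro j
  induction j using innerA.induct arr i with
  | case1 hlt IH =>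
    rw [innerA, if_pos hlt, if_pos rfl, IH]
    constructor
    · intro H j' h hle hne
      exact H j' h (by omega) hne
    · intro H j' h hle hne
      exact H j' h (by omega) hne
  | case2 j hlt hne heq =>
    rw [innerA, if_pos hlt, if_neg hne, if_pos heq]
    refine iff_of_false (by simp) ?_
    intro H
    exact H j hlt le_rfl (fun h => hne h.symm)
      (by rw [List.getD_eq_getElem arr "" hlt] at heq; exact heq.symm)
  | case3 j hlt hne hnstr IH =>
    rw [innerA, if_pos hlt, if_neg hne, if_neg hnstr, IH]
    constructor
    · intro H j' h hle hne'
      rcases Nat.eq_or_lt_of_le hle with rfl | hlt'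
      · rw [← List.getD_eq_getElem arr "" h]; exact fun e => hnstr e.symm
      · exact H j' h (by omega) hne'
    · intro H j' h hle hne'
      exact H j' h (by omega) hne'
  | case4 j hlt =>
    rw [innerA, if_neg hlt]
    refine iff_of_true rfl ?_
    intro j' h hle hne
    omega

lemma count_one_iff (arr : List String) (i : Nat) (h : i < arr.length) :
    arr.count (arr.getD i "") = 1 ↔
      ∀ j' (h' : j' < arr.length), j' ≠ i → arr[j'] ≠ arr.getD i "" := by
  set v := arr.getD i "" with hv
  have hvi : arr[i] = v := (List.getD_eq_getElem arr "" h).symm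
  have hsplit : arr = arr.take i ++ arr[i] :: arr.drop (i + 1) := by
    rw [List.getElem_cons_drop h, List.take_append_drop]
  have hcnt : arr.count v = (arr.take i).count v + 1 + (arr.drop (i + 1)).count v := by
    conv_lhs => rw [hsplit]
    rw [List.count_append, List.count_cons, hvi]
    simp; ring
  constructor
  · intro hc j' h' hne hcontra
    have h0 : (arr.take i).count v = 0 ∧ (arr.drop (i + 1)).count v = 0 := by omega
    rcases Nat.lt_or_ge j' i with hlt | hge
    · have : v ∈ arr.take i := by
        rw [List.mem_iff_getElem]
        exact ⟨j', by simpa [List.length_take] using by omega, by rw [List.getElem_take]; exact hcontra⟩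
      exact absurd this (List.count_eq_zero.mp h0.1)
    · have hgt : i + 1 ≤ j' := by omega
      have : v ∈ arr.drop (i + 1) := by
        rw [List.mem_iff_getElem]
        refine ⟨j' - (i + 1), by simp [List.length_drop]; omega, ?_⟩
        rw [List.getElem_drop]
        have : i + 1 + (j' - (i + 1)) = j' := by omega
        simp only [this]; exact hcontra
      exact absurd this (List.count_eq_zero.mp h0.2)
  · intro H
    have h1 : (arr.take i).count v = 0 := by
      rw [List.count_eq_zero]
      intro hmem
      rw [List.mem_iff_getElem] at hmem
      obtain ⟨j, hj, hjv⟩ := hmem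
      have hjl : j < arr.length := by simp [List.length_take] at hj; omega
      have hji : j ≠ i := by simp [List.length_take] at hj; omega
      exact H j hjl hji (by rwa [List.getElem_take] at hjv)
    have h2 : (arr.drop (i + 1)).count v = 0 := by
      rw [List.count_eq_zero]
      intro hmem
      rw [List.mem_iff_getElem] at hmem
      obtain ⟨j, hj, hjv⟩ := hmem
      have hjl : i + 1 + j < arr.length := by simp [List.length_drop] at hj; omega
      exact H (i + 1 + j) hjl (by omega) (by rwa [List.getElem_drop] at hjv)
    omega

lemma loop_eq (arr : List String) : ∀ i k,
    loopA arr i k = loopB (PySem.Dict.counter arr) (arr.drop i) k := by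
  intro i k
  induction i, k using loopA.induct arr with
  | case1 i k hlt hin hk =>
    rw [loopA, if_pos hlt, if_pos hin, if_pos hk,
        ← List.getElem_cons_drop hlt, loopB]
    have hc : (PySem.Dict.counter arr).getD arr[i] 0 = (arr.count arr[i] : Int) := by
      exact PySem.Dict.getD_counter arr arr[i]
    have h1 : arr.count (arr.getD i "") = 1 := by
      rw [count_one_iff arr i hlt]
      intro j' h' hne
      exact (innerA_iff arr i 0).mp hin j' h' (Nat.zero_le _) hne
    rw [List.getD_eq_getElem arr "" hlt] at h1
    rw [hc, h1]
    simp only [Nat.cast_one, if_pos hk]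
    exact List.getD_eq_getElem arr "" hlt
  | case2 i k hlt hin hk IH =>
    rw [loopA, if_pos hlt, if_pos hin, if_neg hk,
        ← List.getElem_cons_drop hlt, loopB]
    have hc : (PySem.Dict.counter arr).getD arr[i] 0 = (arr.count arr[i] : Int) :=
      PySem.Dict.getD_counter arr arr[i]
    have h1 : arr.count (arr.getD i "") = 1 := by
      rw [count_one_iff arr i hlt]
      intro j' h' hne
      exact (innerA_iff arr i 0).mp hin j' h' (Nat.zero_le _) hne
    rw [List.getD_eq_getElem arr "" hlt] at h1
    rw [hc, h1]
    simp only [Nat.cast_one, if_neg hk]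
    exact IH
  | case3 i k hlt hin IH =>
    rw [loopA, if_pos hlt, if_neg hin,
        ← List.getElem_cons_drop hlt, loopB]
    have hc : (PySem.Dict.counter arr).getD arr[i] 0 = (arr.count arr[i] : Int) :=
      PySem.Dict.getD_counter arr arr[i]
    have h1 : arr.count (arr.getD i "") ≠ 1 := by
      intro hcontra
      apply hin
      rw [innerA_iff arr i 0]
      intro j' h' _ hne
      exact (count_one_iff arr i hlt).mp hcontra j' h' hne
    rw [List.getD_eq_getElem arr "" hlt] at h1
    rw [hc]
    rw [if_neg (by exact_mod_cast h1)]
    exact IH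
  | case4 i k hge =>
    rw [loopA, if_neg hge, List.drop_eq_nil_of_le (by omega), loopB]

-- ===== VERDICT (by name: the statement is the Claim_ definition above) =====
theorem kthDistinct1_spec : Claim_equal_kthDistinct1 := by
  intro arr k _
  show kthDistinct1 arr k = kthDistinct1_alt arr k
  simp only [kthDistinct1, kthDistinct1_alt, PySem.Dict.foldl_insert_getD_add_one_eq_counter]
  simpa using loop_eq arr 0 k
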